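-- pv_equiv track=rewrite | github.com/jciura/SCG-code-comprehension | src/context/context_extraction.py | extract_usage_fragment
-- ===== SOURCE A (Python) =====
-- from typing import Optional
--
-- def extract_usage_fragment(code: str, target_method: str, context_lines: int = 5) -> Optional[str]:
--     """
--     Extracts a fragment of code showing usage of a target method.
--
--     Args:
--         code: Source code text
--         target_method: Method name to locate
--         context_lines: Number of lines before and after to include
--
--     Returns:
--         Code fragment containing the method call, or None if not found
--     """
--     if not target_method or f"{target_method}(" not in code:
--         return None
--     code_lines = code.split("\n")
--     for i, line in enumerate(code_lines):
--         if f"{target_method}(" in line: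
--             start = max(0, i - context_lines)
--             end = min(len(code_lines), i + context_lines + 1)
--             return "\n".join(code_lines[start:end])
--     return None
-- ===== SOURCE B (Python) =====
-- from typing import Optional
--
--
-- def extract_usage_fragment(code: str, target_method: str, context_lines: int = 5) -> Optional[str]:
--     """Locate the first call site by a single substring search and newline
--     counting, instead of scanning the split lines one by one."""
--     if not target_method:
--         return None
--     pos = code.find(target_method + "(")
--     if pos == -1:
--         return None
--     lines = code.split("\n")
--     i = code[:pos].count("\n")
--     start = max(0, i - context_lines)
--     end = min(len(lines), i + context_lines + 1)
--     return "\n".join(lines[start:end])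
-- ===== Notes on version B (the rewrite author's own statement) =====
-- stated objective: alternative
-- what changed: B replaces A's per-line enumerate-and-scan for the call site with a single whole-text find plus a newline count over the prefix before the match to derive the line index.
-- outside the precondition, e.g. on extract_usage_fragment('ab\nc(', 'ab\nc', 5): A returns None, B returns 'ab\nc('
import Mathlib
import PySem

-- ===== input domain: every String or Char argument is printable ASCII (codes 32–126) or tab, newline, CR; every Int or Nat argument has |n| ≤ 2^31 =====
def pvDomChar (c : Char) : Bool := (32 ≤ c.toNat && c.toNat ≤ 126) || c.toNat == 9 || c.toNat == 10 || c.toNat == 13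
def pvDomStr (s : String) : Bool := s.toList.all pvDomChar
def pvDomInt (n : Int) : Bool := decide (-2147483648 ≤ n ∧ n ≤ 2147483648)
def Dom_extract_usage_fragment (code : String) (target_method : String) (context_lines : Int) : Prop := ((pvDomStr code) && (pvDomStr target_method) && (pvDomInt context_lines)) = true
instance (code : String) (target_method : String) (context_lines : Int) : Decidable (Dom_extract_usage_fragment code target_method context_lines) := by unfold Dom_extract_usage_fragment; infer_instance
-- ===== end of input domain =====

-- B replaces A's per-line scan for the call site with one whole-text find plus a newline count
-- over the prefix before the match (alternative decomposition, same asymptotic cost).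
-- Pre_ excludes inputs whose target_method contains a newline while the needle occurs in the code:
-- such a target can never occur inside a single line, so A's line scan returns None while B's
-- whole-text search finds it; both are defensible (method names never contain newlines).


-- ===== PORT A =====
-- A's 'for i, line in enumerate(code_lines): if needle in line: return …' loop.
def aLoop (needle : List Char) (allLines : List (List Char)) (cl : Int) :
    Nat → List (List Char) → Option String
  | _, [] => none
  | i, l :: ls =>
    if PySem.Chars.isIn needle l then
      let start : Int := max 0 ((i : Int) - cl)
      let stop : Int := min ((allLines.length : Int)) ((i : Int) + cl + 1)
      some (String.ofList (PySem.Chars.join ['\n'] (PySem.List.slice allLines (some start) (some stop))))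
    else aLoop needle allLines cl (i + 1) ls

def extract_usage_fragment (code : String) (target_method : String) (context_lines : Int) : Option String :=
  let needle := target_method.toList ++ ['(']
  if target_method.toList = [] then none
  else if ¬ PySem.Chars.isIn needle code.toList then none
  else
    let code_lines := PySem.Chars.splitOn code.toList ['\n']
    aLoop needle code_lines context_lines 0 code_lines

-- ===== PORT B =====
def extract_usage_fragment_alt (code : String) (target_method : String) (context_lines : Int) : Option String :=
  if target_method.toList = [] then none
  else
    let pos := PySem.Chars.find code.toList (target_method.toList ++ ['('])
    if pos = -1 then none
    else
      let lines := PySem.Chars.splitOn code.toList ['\n']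
      let i : Int := (PySem.Chars.count (PySem.Chars.slice code.toList none (some pos)) ['\n'] : Int)
      let start : Int := max 0 (i - context_lines)
      let stop : Int := min ((lines.length : Int)) (i + context_lines + 1)
      some (String.ofList (PySem.Chars.join ['\n'] (PySem.List.slice lines (some start) (some stop))))

-- ===== PRECONDITION & SPEC =====
-- Pre_ excludes inputs whose target_method contains a newline while the needle does occur in the
-- code: there A's line scan returns None (no single line can contain the needle) while B's
-- whole-text search returns a fragment; a defensible corner (method names never contain newlines).
def Pre_extract_usage_fragment (code : String) (target_method : String) (context_lines : Int) : Prop :=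
  '\n' ∉ target_method.toList ∨
    PySem.Chars.isIn (target_method.toList ++ ['(']) code.toList = false
instance (code : String) (target_method : String) (context_lines : Int) : Decidable (Pre_extract_usage_fragment code target_method context_lines) := by unfold Pre_extract_usage_fragment; infer_instance

def pvWitness_extract_usage_fragment : String × String × Int := ("x = f(1)\ny = 2", "f", 1)

def Spec_extract_usage_fragment (code : String) (target_method : String) (context_lines : Int) (out : Option String) : Prop := out = extract_usage_fragment_alt code target_method context_lines
instance (code : String) (target_method : String) (context_lines : Int) (out : Option String) : Decidable (Spec_extract_usage_fragment code target_method context_lines out) := by unfold Spec_extract_usage_fragment; infer_instance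

-- ===== CLAIM (what is proved, stated in full; the proofs are below) =====
def Claim_equal_extract_usage_fragment : Prop := ∀ (code : String) (target_method : String) (context_lines : Int), Dom_extract_usage_fragment code target_method context_lines → Pre_extract_usage_fragment code target_method context_lines → Spec_extract_usage_fragment code target_method context_lines (extract_usage_fragment code target_method context_lines)

-- ===== LEMMAS AND PROOFS =====

def mySplit : List Char → List (List Char)
  | [] => [[]]
  | c :: cs =>
    if c = '\n' then [] :: mySplit cs
    else
      match mySplit cs with
      | [] => [[c]]
      | h :: t => (c :: h) :: t

def modHead (pre : List Char) : List (List Char) → List (List Char)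
  | [] => [pre]
  | h :: t => (pre ++ h) :: t

theorem mySplit_ne_nil (cs : List Char) : mySplit cs ≠ [] := by
  cases cs with
  | nil => simp [mySplit]
  | cons c cs =>
    simp only [mySplit]
    split
    · simp
    · split <;> simp

theorem count_go_spec : ∀ (fuel : Nat) (l : List Char) (acc : Nat),
    l.length ≤ fuel → PySem.Chars.count.go ['\n'] fuel l acc = acc + l.count '\n' := by
  intro fuel
  induction fuel with
  | zero =>
    intro l acc h
    have : l = [] := List.length_eq_zero_iff.mp (Nat.le_zero.mp h)
    subst this
    simp [PySem.Chars.count.go]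
  | succ fuel ih =>
    intro l acc h
    cases l with
    | nil => simp [PySem.Chars.count.go]
    | cons c rest =>
      by_cases hc : c = '\n'
      · subst hc
        have h1 : List.isPrefixOf ['\n'] ('\n' :: rest) = true := by simp [List.isPrefixOf]
        simp only [PySem.Chars.count.go, h1, if_true, List.length_singleton, List.drop_succ_cons,
          List.length_nil, List.drop_zero]
        rw [ih rest (acc+1) (by simpa using h)]
        simp [List.count_cons]
        omega
      · have h1 : List.isPrefixOf ['\n'] (c :: rest) = false := by
          simp [List.isPrefixOf]
          exact fun hh => hc hh.symm
        simp only [PySem.Chars.count.go, h1, Bool.false_eq_true, if_false]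
        rw [ih rest acc (by simpa using h)]
        simp [List.count_cons, hc]

theorem count_newline (s : List Char) : PySem.Chars.count s ['\n'] = s.count '\n' := by
  rw [PySem.Chars.count]
  simp only [List.isEmpty_cons, if_false, Bool.false_eq_true]
  exact (count_go_spec s.length s 0 le_rfl).trans (by omega)

theorem splitOn_go_spec : ∀ (fuel : Nat) (l cur : List Char) (acc : List (List Char)),
    l.length < fuel →
    PySem.Chars.splitOn.go ['\n'] fuel l cur acc = acc.reverse ++ modHead cur.reverse (mySplit l) := by
  intro fuel
  induction fuel with
  | zero => intro l cur acc h; omega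
  | succ fuel ih =>
    intro l cur acc h
    cases l with
    | nil => simp [PySem.Chars.splitOn.go, mySplit, modHead]
    | cons c rest =>
      by_cases hc : c = '\n'
      · subst hc
        have h1 : List.isPrefixOf ['\n'] ('\n' :: rest) = true := by simp [List.isPrefixOf]
        simp only [PySem.Chars.splitOn.go, h1, if_true, List.length_singleton, List.drop_succ_cons,
          List.length_nil, List.drop_zero]
        rw [ih rest [] (cur.reverse :: acc) (by simpa using h)]
        simp only [mySplit, if_true]
        cases hms : mySplit rest with
        | nil => exact absurd hms (mySplit_ne_nil rest)
        | cons mh mt => simp [modHead]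
      · have h1 : List.isPrefixOf ['\n'] (c :: rest) = false := by
          simp [List.isPrefixOf]
          exact fun hh => hc hh.symm
        simp only [PySem.Chars.splitOn.go, h1, Bool.false_eq_true, if_false]
        rw [ih rest (c :: cur) acc (by simpa using h)]
        simp only [mySplit, hc, if_false]
        cases hms : mySplit rest with
        | nil => exact absurd hms (mySplit_ne_nil rest)
        | cons mh mt => simp [modHead, hms]

theorem splitOn_eq_mySplit (s : List Char) : PySem.Chars.splitOn s ['\n'] = mySplit s := by
  rw [PySem.Chars.splitOn]
  rw [splitOn_go_spec (s.length + 1) s [] [] (by omega)]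
  cases hms : mySplit s with
  | nil => exact absurd hms (mySplit_ne_nil s)
  | cons mh mt => simp [modHead]

theorem mySplit_no_nl (l : List Char) (h : '\n' ∉ l) : mySplit l = [l] := by
  induction l with
  | nil => simp [mySplit]
  | cons c cs ih =>
    have hc : c ≠ '\n' := fun hh => h (hh ▸ List.mem_cons_self)
    have hcs : '\n' ∉ cs := fun hh => h (List.mem_cons_of_mem _ hh)
    simp only [mySplit, hc, if_false, ih hcs]

theorem mySplit_append_nl (l r : List Char) (h : '\n' ∉ l) :
    mySplit (l ++ '\n' :: r) = l :: mySplit r := by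
  induction l with
  | nil => simp [mySplit]
  | cons c cs ih =>
    have hc : c ≠ '\n' := fun hh => h (hh ▸ List.mem_cons_self)
    have hcs : '\n' ∉ cs := fun hh => h (List.mem_cons_of_mem _ hh)
    simp only [List.cons_append, mySplit, hc, if_false, ih hcs]

-- prefix of a drop extends across trailing material
theorem prefix_drop_append (needle l rest : List Char) (j : Nat) (hj : j ≤ l.length)
    (h : needle <+: l.drop j) : needle <+: (l ++ rest).drop j := by
  rw [List.drop_append, Nat.sub_eq_zero_of_le hj, List.drop_zero]
  exact h.trans (List.prefix_append _ _)

theorem key_lemma (needle : List Char) (hne : needle ≠ []) (hnl : '\n' ∉ needle) :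
    ∀ (n : Nat) (cs : List Char) (p : Nat), cs.count '\n' = n →
    needle <+: cs.drop p → (∀ i < p, ¬ needle <+: cs.drop i) →
    List.findIdx? (fun l => PySem.Chars.isIn needle l) (mySplit cs) = some ((cs.take p).count '\n') := by
  intro n
  induction n with
  | zero =>
    intro cs p hcount hp hmin
    have hnin : '\n' ∉ cs := by
      intro hmem
      have := List.count_pos_iff.mpr hmem
      omega
    rw [mySplit_no_nl cs hnin]
    have hinf : PySem.Chars.isIn needle cs = true := by
      rw [← PySem.Chars.exists_prefix_drop_iff_isIn]
      exact ⟨p, hp⟩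
    have : '\n' ∉ cs.take p := fun hh => hnin (List.mem_of_mem_take hh)
    rw [List.findIdx?_cons, hinf, List.count_eq_zero.mpr this]
    rfl
  | succ n ih =>
    intro cs p hcount hp hmin
    -- split cs at the first newline
    have hmem : '\n' ∈ cs := by
      have : cs.count '\n' > 0 := by omega
      exact List.count_pos_iff.mp this
    obtain ⟨l, r, rfl, hlnl⟩ := List.eq_append_cons_of_mem hmem
    have hlc : l.count '\n' = 0 := List.count_eq_zero.mpr hlnl
    have hrc : r.count '\n' = n := by
      rw [List.count_append, List.count_cons] at hcount
      simp at hcount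
      omega
    rw [mySplit_append_nl l r hlnl]
    by_cases hin : p + needle.length ≤ l.length
    · -- occurrence inside l: first line matches
      have hpl : p ≤ l.length := by omega
      have hpre : needle <+: l.drop p := by
        rw [List.drop_append, Nat.sub_eq_zero_of_le hpl, List.drop_zero] at hp
        rw [List.prefix_iff_eq_take] at hp ⊢
        rw [List.take_append, Nat.sub_eq_zero_of_le (by simp; omega), List.take_zero,
          List.append_nil] at hp
        exact hp
      have hinf : PySem.Chars.isIn needle l = true := by
        rw [← PySem.Chars.exists_prefix_drop_iff_isIn]
        exact ⟨p, hpre⟩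
      have htake : ((l ++ '\n' :: r).take p).count '\n' = 0 := by
        rw [List.take_append, Nat.sub_eq_zero_of_le hpl, List.take_zero, List.append_nil]
        exact List.count_eq_zero.mpr fun hh => hlnl (List.mem_of_mem_take hh)
      rw [List.findIdx?_cons, hinf, htake]
      rfl
    · -- occurrence strictly after the newline
      have hgt : l.length + 1 ≤ p := by
        by_contra hlt
        push_neg at hlt
        have hpl : p ≤ l.length := by omega
        -- needle covers the newline at index l.length: contradiction with hnl
        have hlen : needle.length ≤ ((l ++ '\n' :: r).drop p).length := hp.length_le
        have hidx : l.length - p < needle.length := by omega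
        have : needle[l.length - p]'hidx = '\n' := by
          rw [hp.getElem hidx, List.getElem_drop]
          have hq : p + (l.length - p) = l.length := by omega
          simp only [hq]
          rw [List.getElem_append_right (le_refl l.length)]
          simp
        exact hnl (this ▸ List.getElem_mem hidx)
      -- shift into r
      set p' := p - (l.length + 1) with hp'
      have hdrop : ∀ k : Nat, (l ++ '\n' :: r).drop (l.length + 1 + k) = r.drop k := by
        intro k
        rw [List.drop_append, List.drop_eq_nil_of_le (by omega)]
        have h2 : l.length + 1 + k - l.length = k + 1 := by omega
        rw [h2, List.nil_append, List.drop_succ_cons]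
      have hpr : needle <+: r.drop p' := by
        have : l.length + 1 + p' = p := by omega
        rw [← this] at hp
        rwa [hdrop p'] at hp
      have hminr : ∀ i < p', ¬ needle <+: r.drop i := by
        intro i hi hpre
        have := hmin (l.length + 1 + i) (by omega)
        rw [hdrop i] at this
        exact this hpre
      have hnotl : PySem.Chars.isIn needle l = false := by
        rw [PySem.Chars.isIn_eq_false_iff]
        intro hinf
        obtain ⟨pre, suf, hps⟩ := hinf
        -- needle infix of l gives a prefix-of-drop at some j ≤ l.length
        have : ∃ j, needle <+: l.drop j := by
          refine ⟨pre.length, ?_⟩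
          rw [← hps, List.append_assoc, List.drop_append, Nat.sub_self, List.drop_zero,
            List.drop_length, List.nil_append]
          exact List.prefix_append _ _
        obtain ⟨j, hj⟩ := this
        have hjl : j ≤ l.length := by
          by_contra hjg
          push_neg at hjg
          rw [List.drop_eq_nil_of_le (by omega)] at hj
          exact hne (List.prefix_nil.mp hj)
        exact hmin j (by omega) (prefix_drop_append needle l ('\n' :: r) j hjl hj)
      rw [List.findIdx?_cons, hnotl]
      simp only [Bool.false_eq_true, if_false]
      rw [ih r p' hrc hpr hminr]
      have htake : ((l ++ '\n' :: r).take p).count '\n' = (r.take p').count '\n' + 1 := by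
        rw [List.take_append, List.take_of_length_le (by omega)]
        have h2 : p - l.length = p' + 1 := by omega
        rw [h2, List.take_succ_cons]
        simp [List.count_append, List.count_cons, hlc]
      rw [htake]
      rfl

theorem aLoop_eq_findIdx (needle : List Char) (all : List (List Char)) (cl : Int) :
    ∀ (ls : List (List Char)) (k : Nat),
    aLoop needle all cl k ls = (List.findIdx? (fun l => PySem.Chars.isIn needle l) ls).map
      (fun j =>
        String.ofList (PySem.Chars.join ['\n'] (PySem.List.slice all
          (some (max 0 (((k + j : Nat) : Int) - cl)))
          (some (min ((all.length : Int)) (((k + j : Nat) : Int) + cl + 1)))))) := by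
  intro ls
  induction ls with
  | nil => intro k; simp [aLoop]
  | cons l ls ih =>
    intro k
    rw [aLoop, List.findIdx?_cons]
    by_cases h : PySem.Chars.isIn needle l
    · simp only [h, if_true, Option.map_some, Nat.add_zero]
    · simp only [h, Bool.false_eq_true, if_false, ih (k + 1), Option.map_map]
      congr 1
      funext j
      simp only [Function.comp_apply]
      have h1 : ((k + (j + 1) : Nat) : Int) = ((k + 1 + j : Nat) : Int) := by push_cast; ring
      rw [h1]

-- ===== VERDICT (by name: the statement is the Claim_ definition above) =====
theorem extract_usage_fragment_spec : Claim_equal_extract_usage_fragment := by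
  intro code target_method context_lines _dom hpre
  unfold Spec_extract_usage_fragment
  unfold extract_usage_fragment extract_usage_fragment_alt
  by_cases ht : target_method.toList = []
  · simp [ht]
  · simp only [ht, if_false]
    have hne : target_method.toList ++ ['('] ≠ [] := by simp
    by_cases hIn : PySem.Chars.isIn (target_method.toList ++ ['(']) code.toList = true
    · -- found: both return the fragment around the same line index
      have hnl : '\n' ∉ target_method.toList ++ ['('] := by
        intro hmem
        rcases List.mem_append.mp hmem with h | h
        · rcases hpre with hp' | hp'
          · exact hp' h
          · rw [hp'] at hIn; exact Bool.false_ne_true hIn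
        · simp at h
      have hinf := (PySem.Chars.isIn_iff_infix _ _).mp hIn
      have hfind0 : 0 ≤ PySem.Chars.find code.toList (target_method.toList ++ ['(']) :=
        (PySem.Chars.find_nonneg_iff _ _).mpr hinf
      have hfindne : PySem.Chars.find code.toList (target_method.toList ++ ['(']) ≠ -1 := by omega
      obtain ⟨hp, hmin⟩ := PySem.Chars.find_spec hfind0
      have hkey := key_lemma (target_method.toList ++ ['(']) hne hnl (code.toList.count '\n')
        code.toList (PySem.Chars.find code.toList (target_method.toList ++ ['('])).toNat rfl hp hmin
      simp only [hIn, not_true, if_false, hfindne, if_false, ite_false]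
      rw [splitOn_eq_mySplit, aLoop_eq_findIdx, hkey]
      rw [PySem.Chars.slice_eq_listSlice, PySem.List.slice_to code.toList hfind0, count_newline]
      simp
    · -- not found: both return none
      have hfalse : PySem.Chars.isIn (target_method.toList ++ ['(']) code.toList = false := by
        simpa using hIn
      have hninf := (PySem.Chars.isIn_eq_false_iff _ _).mp hfalse
      have hfind : PySem.Chars.find code.toList (target_method.toList ++ ['(']) = -1 :=
        (PySem.Chars.find_eq_neg_one_iff _ _).mpr hninf
      simp [hIn, hfind]
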